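-- pv_equiv track=rewrite | github.com/iamneilroberts/windows-mcp-bridge | mcp_use/agents/prompt_viewer.py | create_prompt_editor_view
-- ===== SOURCE A (Python) =====
-- from typing import List, Dict, Any, Optional
--
-- def create_prompt_editor_view(prompts: List[Dict[str, Any]]) -> str:
--     """Create an editable view of all prompts."""
--     output = "# Prompt Management Dashboard\n\n"
--     output += "This view shows all prompts from the D1 database. "
--     output += "You can use the slash commands to manage them:\n\n"
--     output += "- `/prompts list` - List all prompts\n"
--     output += "- `/prompts view <name>` - View a specific prompt\n"
--     output += "- `/prompts edit <name>` - Edit a prompt\n"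
--     output += "- `/prompts create <name>` - Create a new prompt\n"
--     output += "- `/prompts delete <name>` - Delete a prompt\n\n"
--
--     output += "---\n\n"
--
--     # Group by category
--     by_category = {}
--     for prompt in prompts:
--         category = prompt.get('category', 'Uncategorized')
--         if category not in by_category:
--             by_category[category] = []
--         by_category[category].append(prompt)
--
--     # Create a table view
--     output += "## All Prompts\n\n"
--     output += "| Category | Name | Description | Actions |\n"
--     output += "|----------|------|-------------|----------|\n"
--
--     for category, category_prompts in sorted(by_category.items()):
--         for prompt in sorted(category_prompts, key=lambda p: p.get('name', '')):
--             name = prompt.get('name', 'Unnamed')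
--             desc = prompt.get('description', 'No description')[:50]
--             if len(prompt.get('description', '')) > 50:
--                 desc += "..."
--
--             actions = f"[View](/prompts view {name}) | [Edit](/prompts edit {name})"
--             output += f"| {category} | {name} | {desc} | {actions} |\n"
--
--     output += "\n---\n\n"
--     output += "## Quick Stats\n\n"
--     output += f"- Total prompts: {len(prompts)}\n"
--     output += f"- Categories: {len(by_category)}\n"
--
--     for category, category_prompts in sorted(by_category.items()):
--         output += f"  - {category}: {len(category_prompts)} prompts\n"
--
--     return output
-- ===== SOURCE B (Python) =====
-- HEADER = ("# Prompt Management Dashboard\n\n"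
--           "This view shows all prompts from the D1 database. "
--           "You can use the slash commands to manage them:\n\n"
--           "- `/prompts list` - List all prompts\n"
--           "- `/prompts view <name>` - View a specific prompt\n"
--           "- `/prompts edit <name>` - Edit a prompt\n"
--           "- `/prompts create <name>` - Create a new prompt\n"
--           "- `/prompts delete <name>` - Delete a prompt\n\n"
--           "---\n\n"
--           "## All Prompts\n\n"
--           "| Category | Name | Description | Actions |\n"
--           "|----------|------|-------------|----------|\n")
--
--
-- def _row(c, p):
--     name = p.get('name', 'Unnamed')
--     desc = p.get('description', 'No description')[:50]
--     if len(p.get('description', '')) > 50: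
--         desc += "..."
--     return (f"| {c} | {name} | {desc} | "
--             f"[View](/prompts view {name}) | [Edit](/prompts edit {name}) |\n")
--
--
-- def create_prompt_editor_view(prompts):
--     """Create an editable view of all prompts."""
--     cats = [p.get('category', 'Uncategorized') for p in prompts]
--     categories = sorted(set(cats))
--     rows = [_row(c, p)
--             for c in categories
--             for p in sorted((q for q in prompts
--                              if q.get('category', 'Uncategorized') == c),
--                             key=lambda q: q.get('name', ''))]
--     stats = [f"  - {c}: {cats.count(c)} prompts\n" for c in categories]
--     return (HEADER + "".join(rows)
--             + "\n---\n\n## Quick Stats\n\n"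
--             + f"- Total prompts: {len(prompts)}\n"
--             + f"- Categories: {len(categories)}\n"
--             + "".join(stats))
-- ===== Notes on version B (the rewrite author's own statement) =====
-- stated objective: simpler
-- what changed: B drops A's dict-of-lists grouping and string-accumulating += loops: it sorts the distinct categories once, builds the table rows and the stats lines as list comprehensions (rows via a name-sorted filter per category, counts via list.count), and returns one join of a constant header, the joined rows and the joined stats.
import Mathlib
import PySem

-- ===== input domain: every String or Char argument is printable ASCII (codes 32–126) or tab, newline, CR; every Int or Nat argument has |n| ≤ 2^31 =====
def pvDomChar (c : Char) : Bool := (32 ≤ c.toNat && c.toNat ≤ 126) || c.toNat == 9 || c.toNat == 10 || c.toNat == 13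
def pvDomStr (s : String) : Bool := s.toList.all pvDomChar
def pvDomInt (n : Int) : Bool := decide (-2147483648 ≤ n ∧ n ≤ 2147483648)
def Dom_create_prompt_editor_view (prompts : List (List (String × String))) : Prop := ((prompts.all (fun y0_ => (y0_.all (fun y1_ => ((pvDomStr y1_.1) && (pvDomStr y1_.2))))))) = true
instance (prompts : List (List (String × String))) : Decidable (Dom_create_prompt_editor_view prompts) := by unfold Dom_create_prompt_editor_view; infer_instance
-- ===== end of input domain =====

-- B replaces A's dict-of-lists grouping and string-accumulating loops by a sorted list of the
-- distinct categories plus list comprehensions joined once (objective: simpler, no dict, no +=).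

-- shared helper: p.get(k, dflt) on a prompt dict
def pvGet (p : List (String × String)) (k dflt : String) : String :=
  (PySem.Dict.mk p).getD k dflt

-- ===== PORT A =====
def create_prompt_editor_view (prompts : List (List (String × String))) : String :=
  let output := "# Prompt Management Dashboard\n\n"
  let output := output ++ "This view shows all prompts from the D1 database. "
  let output := output ++ "You can use the slash commands to manage them:\n\n"
  let output := output ++ "- `/prompts list` - List all prompts\n"
  let output := output ++ "- `/prompts view <name>` - View a specific prompt\n"
  let output := output ++ "- `/prompts edit <name>` - Edit a prompt\n"
  let output := output ++ "- `/prompts create <name>` - Create a new prompt\n"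
  let output := output ++ "- `/prompts delete <name>` - Delete a prompt\n\n"
  let output := output ++ "---\n\n"
  let by_category : PySem.Dict String (List (List (String × String))) :=
    prompts.foldl (fun d prompt =>
      (if d.contains (pvGet prompt "category" "Uncategorized") then d
       else d.insert (pvGet prompt "category" "Uncategorized") []).modify
        (pvGet prompt "category" "Uncategorized") [] (fun l => l ++ [prompt])) PySem.Dict.empty
  let output := output ++ "## All Prompts\n\n"
  let output := output ++ "| Category | Name | Description | Actions |\n"
  let output := output ++ "|----------|------|-------------|----------|\n"
  -- sorted(by_category.items()): dict keys are distinct, so Python's tuple comparison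
  -- never reaches the second component — key = first component is exact
  let output := (PySem.List.sorted by_category.items (fun q => q.1)).foldl (fun output q =>
    (PySem.List.sorted q.2 (fun p => pvGet p "name" "")).foldl (fun output prompt =>
      let name := pvGet prompt "name" "Unnamed"
      let desc := PySem.Str.slice (pvGet prompt "description" "No description") none (some 50)
      let desc := if PySem.Str.len (pvGet prompt "description" "") > 50 then desc ++ "..." else desc
      let actions := "[View](/prompts view " ++ name ++ ") | [Edit](/prompts edit " ++ name ++ ")"
      output ++ ("| " ++ q.1 ++ " | " ++ name ++ " | " ++ desc ++ " | " ++ actions ++ " |\n")) output) output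
  let output := output ++ "\n---\n\n"
  let output := output ++ "## Quick Stats\n\n"
  let output := output ++ ("- Total prompts: " ++ PySem.Int.toStr (prompts.length : Int) ++ "\n")
  let output := output ++ ("- Categories: " ++ PySem.Int.toStr (by_category.size : Int) ++ "\n")
  let output := (PySem.List.sorted by_category.items (fun q => q.1)).foldl (fun output q =>
    output ++ ("  - " ++ q.1 ++ ": " ++ PySem.Int.toStr (q.2.length : Int) ++ " prompts\n")) output
  output

-- ===== PORT B =====
-- the HEADER constant of Source B (Python concatenates the adjacent literals at parse time)
def pvHeader : String := "# Prompt Management Dashboard\n\nThis view shows all prompts from the D1 database. You can use the slash commands to manage them:\n\n- `/prompts list` - List all prompts\n- `/prompts view <name>` - View a specific prompt\n- `/prompts edit <name>` - Edit a prompt\n- `/prompts create <name>` - Create a new prompt\n- `/prompts delete <name>` - Delete a prompt\n\n---\n\n## All Prompts\n\n| Category | Name | Description | Actions |\n|----------|------|-------------|----------|\n"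

-- _row of Source B
def pvRow (c : String) (p : List (String × String)) : String :=
  let name := pvGet p "name" "Unnamed"
  let desc := PySem.Str.slice (pvGet p "description" "No description") none (some 50)
  let desc := if PySem.Str.len (pvGet p "description" "") > 50 then desc ++ "..." else desc
  "| " ++ c ++ " | " ++ name ++ " | " ++ desc ++ " | [View](/prompts view " ++ name ++ ") | [Edit](/prompts edit " ++ name ++ ") |\n"

def create_prompt_editor_view_alt (prompts : List (List (String × String))) : String :=
  let cats := prompts.map (fun p => pvGet p "category" "Uncategorized")
  let categories := PySem.List.sorted (PySem.Set.ofList cats) (fun c => c)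
  let rows := categories.flatMap (fun c =>
    (PySem.List.sorted (prompts.filter (fun q => pvGet q "category" "Uncategorized" == c))
        (fun q => pvGet q "name" "")).map (fun p => pvRow c p))
  let stats := categories.map (fun c =>
    "  - " ++ c ++ ": " ++ PySem.Int.toStr (PySem.List.count cats c : Int) ++ " prompts\n")
  pvHeader ++ PySem.Str.join "" rows
    ++ "\n---\n\n## Quick Stats\n\n"
    ++ ("- Total prompts: " ++ PySem.Int.toStr (prompts.length : Int) ++ "\n")
    ++ ("- Categories: " ++ PySem.Int.toStr (categories.length : Int) ++ "\n")
    ++ PySem.Str.join "" stats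

-- ===== PRECONDITION & SPEC =====
def Spec_create_prompt_editor_view (prompts : List (List (String × String))) (out : String) : Prop := out = create_prompt_editor_view_alt prompts
instance (prompts : List (List (String × String))) (out : String) : Decidable (Spec_create_prompt_editor_view prompts out) := by unfold Spec_create_prompt_editor_view; infer_instance

-- ===== CLAIM (what is proved, stated in full; the proofs are below) =====
def Claim_equal_create_prompt_editor_view : Prop := ∀ (prompts : List (List (String × String))), Dom_create_prompt_editor_view prompts → Spec_create_prompt_editor_view prompts (create_prompt_editor_view prompts)

-- ===== LEMMAS AND PROOFS =====

-- A's loop step ('if absent insert []; then append') is one dict 'modify'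
theorem pv_step_eq :
    (fun (d : PySem.Dict String (List (List (String × String)))) prompt =>
      (if d.contains (pvGet prompt "category" "Uncategorized") then d
       else d.insert (pvGet prompt "category" "Uncategorized") []).modify
        (pvGet prompt "category" "Uncategorized") [] (fun l => l ++ [prompt]))
    = (fun d prompt =>
        d.modify (pvGet prompt "category" "Uncategorized") [] (fun l => l ++ [prompt])) := by
  funext d p
  by_cases h : d.contains (pvGet p "category" "Uncategorized")
  · simp [h]
  · have h' : d.contains (pvGet p "category" "Uncategorized") = false := by simpa using h
    simp only [h', Bool.false_eq_true, ite_false, PySem.Dict.modify,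
      PySem.Dict.getD_insert_self, PySem.Dict.insert_insert_self,
      PySem.Dict.getD_of_not_contains _ _ h']

-- the grouped dict, written with the plain 'modify' step
def pvGroup (prompts : List (List (String × String))) :
    PySem.Dict String (List (List (String × String))) :=
  prompts.foldl (fun d prompt =>
    d.modify (pvGet prompt "category" "Uncategorized") [] (fun l => l ++ [prompt])) PySem.Dict.empty

theorem pvGroup_keys (prompts : List (List (String × String))) :
    (pvGroup prompts).keys
      = PySem.Set.ofList (prompts.map (fun p => pvGet p "category" "Uncategorized")) := by
  have h := PySem.Dict.keys_foldl_modify_key prompts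
    (fun p => pvGet p "category" "Uncategorized") []
    (fun _ prompt => fun l => l ++ [prompt]) PySem.Dict.empty
  simpa [pvGroup, PySem.Dict.keys_empty, PySem.Set.update_nil_left] using h

theorem pvGroup_keys_nodup (prompts : List (List (String × String))) :
    (pvGroup prompts).keys.Nodup := by
  rw [pvGroup_keys]; exact PySem.Set.nodup_ofList _

theorem pvGroup_getD (prompts : List (List (String × String))) (c : String) :
    (pvGroup prompts).getD c []
      = prompts.filter (fun p => pvGet p "category" "Uncategorized" == c) := by
  have h := PySem.Dict.getD_foldl_modify_append
    (prompts.map (fun p => (pvGet p "category" "Uncategorized", p))) PySem.Dict.empty c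
  rw [List.foldl_map] at h
  simpa [pvGroup, PySem.Dict.getD_empty, List.filter_map, Function.comp_def, List.map_map] using h

theorem pvGroup_items (prompts : List (List (String × String))) :
    (pvGroup prompts).items
      = (PySem.Set.ofList (prompts.map (fun p => pvGet p "category" "Uncategorized"))).map
          (fun c => (c, prompts.filter (fun p => pvGet p "category" "Uncategorized" == c))) := by
  rw [PySem.Dict.items_eq_map_keys _ (pvGroup_keys_nodup prompts) [], pvGroup_keys]
  exact List.map_congr_left (fun c _ => by rw [pvGroup_getD])

-- A's sorted(items) is the map of B's per-category pair over B's sorted distinct categories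
theorem pvGroup_sorted_items (prompts : List (List (String × String))) :
    PySem.List.sorted (pvGroup prompts).items (fun q => q.1)
      = (PySem.List.sorted
          (PySem.Set.ofList (prompts.map (fun p => pvGet p "category" "Uncategorized")))
          (fun c => c)).map
          (fun c => (c, prompts.filter (fun p => pvGet p "category" "Uncategorized" == c))) := by
  apply PySem.List.sorted_eq_of_perm_of_pairwise_lt
  · rw [pvGroup_items]
    exact List.Perm.map _ (PySem.List.sorted_perm _ _ _)
  · exact List.Pairwise.map _ (fun a b h => h) (PySem.List.sorted_ofList_pairwise_lt _)

theorem pvGroup_size (prompts : List (List (String × String))) :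
    (pvGroup prompts).size
      = (PySem.List.sorted
          (PySem.Set.ofList (prompts.map (fun p => pvGet p "category" "Uncategorized")))
          (fun c => c)).length := by
  show (pvGroup prompts).items.length = _
  rw [pvGroup_items, List.length_map, PySem.List.length_sorted]

theorem pv_filter_length (prompts : List (List (String × String))) (c : String) :
    ((prompts.filter (fun p => pvGet p "category" "Uncategorized" == c)).length : Int)
      = (PySem.List.count (prompts.map (fun p => pvGet p "category" "Uncategorized")) c : Int) := by
  simp [PySem.List.count, List.count, List.countP_map, Function.comp_def,
    ← List.countP_eq_length_filter]

-- "".join over List Char is flatten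
theorem pvJoinChars (l : List (List Char)) : PySem.Chars.join [] l = l.flatten := by
  induction l with
  | nil => rfl
  | cons p t ih =>
    cases t with
    | nil => simp [PySem.Chars.join_singleton]
    | cons q r => rw [PySem.Chars.join_cons_cons]; simp_all

theorem pvJoin_nil : PySem.Str.join "" [] = "" := rfl

theorem pvJoin_cons (x : String) (l : List String) :
    PySem.Str.join "" (x :: l) = x ++ PySem.Str.join "" l := by
  simp [PySem.Str.join, pvJoinChars]

theorem pvJoin_append (l₁ l₂ : List String) :
    PySem.Str.join "" (l₁ ++ l₂) = PySem.Str.join "" l₁ ++ PySem.Str.join "" l₂ := by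
  induction l₁ with
  | nil => simp [pvJoin_nil]
  | cons x t ih => simp [pvJoin_cons, ih, String.append_assoc]

-- a Python '+=' loop over strings is the join of the mapped list
theorem pvFoldStr {α : Type} (l : List α) (f : α → String) (init : String) :
    l.foldl (fun acc x => acc ++ f x) init = init ++ PySem.Str.join "" (l.map f) := by
  induction l generalizing init with
  | nil => simp [pvJoin_nil]
  | cons x t ih => simp [List.foldl_cons, ih, pvJoin_cons, String.append_assoc]

-- join of per-category joins is the join of the flatMap
theorem pvJoin_flatMap {α : Type} (l : List α) (g : α → List String) :
    PySem.Str.join "" (l.flatMap g)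
      = PySem.Str.join "" (l.map (fun c => PySem.Str.join "" (g c))) := by
  induction l with
  | nil => rfl
  | cons x t ih => simp [List.flatMap_cons, pvJoin_append, pvJoin_cons, ih]

-- literal-splitting facts (kernel-checked) aligning B's merged literals with A's pieces
set_option maxRecDepth 8192 in
theorem pvHeader_split : pvHeader
    = "# Prompt Management Dashboard\n\n" ++ "This view shows all prompts from the D1 database. "
      ++ "You can use the slash commands to manage them:\n\n" ++ "- `/prompts list` - List all prompts\n"
      ++ "- `/prompts view <name>` - View a specific prompt\n" ++ "- `/prompts edit <name>` - Edit a prompt\n"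
      ++ "- `/prompts create <name>` - Create a new prompt\n" ++ "- `/prompts delete <name>` - Delete a prompt\n\n"
      ++ "---\n\n" ++ "## All Prompts\n\n" ++ "| Category | Name | Description | Actions |\n"
      ++ "|----------|------|-------------|----------|\n" := rfl

theorem pvQS_split : ("\n---\n\n## Quick Stats\n\n" : String) = "\n---\n\n" ++ "## Quick Stats\n\n" := rfl

theorem pvView_split : (" | [View](/prompts view " : String) = " | " ++ "[View](/prompts view " := rfl

theorem pvEnd_split : (") |\n" : String) = ")" ++ " |\n" := rfl

-- ===== VERDICT (by name: the statement is the Claim_ definition above) =====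
theorem create_prompt_editor_view_spec : Claim_equal_create_prompt_editor_view := by
  intro prompts _
  show create_prompt_editor_view prompts = create_prompt_editor_view_alt prompts
  simp only [create_prompt_editor_view, create_prompt_editor_view_alt, pvRow]
  rw [pv_step_eq]
  rw [show prompts.foldl (fun d prompt =>
        d.modify (pvGet prompt "category" "Uncategorized") [] (fun l => l ++ [prompt]))
        PySem.Dict.empty = pvGroup prompts from rfl]
  rw [pvGroup_sorted_items, pvGroup_size, pvJoin_flatMap]
  simp only [pvFoldStr, List.map_map, Function.comp_def, pv_filter_length, pvHeader_split,
    pvQS_split, pvView_split, pvEnd_split, String.append_assoc]
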